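-- pv_equiv track=rewrite | github.com/galthran-wq/aste_chain | convert_dataset_to_hg.py | example_to_string
-- ===== SOURCE A (Python) =====
-- def example_to_string(example_text, triplets):
--     aspects =[
--         " ".join(example_text[token_i] for token_i in triplet[0])
--         for triplet in triplets
--     ]
--     opinions = [
--         " ".join(example_text[token_i] for token_i in triplet[1])
--         for triplet in triplets
--     ]
--     polarities = [
--         triplet[2]
--         for triplet in triplets
--     ]
--     return " ".join(example_text), [
--         tuple(triplet) for triplet in list(zip(aspects, opinions, polarities))
--     ]
-- ===== SOURCE B (Python) =====
-- def example_to_string(example_text, triplets):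
--     def render(indices):
--         out = ""
--         first = True
--         for i in indices:
--             word = example_text[i]
--             out = word if first else out + " " + word
--             first = False
--         return out
--     sentence = render(range(len(example_text)))
--     return sentence, [(render(t[0]), render(t[1]), t[2]) for t in triplets]
-- ===== Notes on version B (the rewrite author's own statement) =====
-- stated objective: alternative
-- what changed: Replaces str.join plus three comprehensions and zip with one hand-rolled accumulator fold 'render' used uniformly for the sentence (over range(len(text))) and for each aspect/opinion phrase, building each output tuple directly.
import Mathlib
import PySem

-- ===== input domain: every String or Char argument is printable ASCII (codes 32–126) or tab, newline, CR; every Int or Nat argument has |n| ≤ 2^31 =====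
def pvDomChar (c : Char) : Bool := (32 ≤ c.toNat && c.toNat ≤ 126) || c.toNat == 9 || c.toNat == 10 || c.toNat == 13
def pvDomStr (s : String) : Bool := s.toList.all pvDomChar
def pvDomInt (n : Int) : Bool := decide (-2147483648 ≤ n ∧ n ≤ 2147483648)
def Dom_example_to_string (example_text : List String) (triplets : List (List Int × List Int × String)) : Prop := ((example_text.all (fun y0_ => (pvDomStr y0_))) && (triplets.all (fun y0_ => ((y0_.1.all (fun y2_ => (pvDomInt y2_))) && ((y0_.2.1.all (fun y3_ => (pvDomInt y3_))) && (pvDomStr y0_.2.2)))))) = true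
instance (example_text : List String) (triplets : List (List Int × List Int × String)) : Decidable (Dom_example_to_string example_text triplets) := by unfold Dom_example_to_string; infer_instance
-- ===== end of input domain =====

-- B drops str.join/zip entirely: one hand-rolled accumulator fold renders the sentence and every phrase, building each tuple directly (objective: alternative; same cost).

-- ===== PORT A =====
-- " ".join(example_text[token_i] for token_i in idxs); pyGetD is exact under Pre_ (indices in range)
def etsA_join (text : List String) (idxs : List Int) : String :=
  PySem.Str.join " " (idxs.map (fun i => PySem.List.pyGetD text i ""))

def example_to_string (example_text : List String) (triplets : List (List Int × List Int × String)) : String × (List (String × String × String)) :=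
  let aspects := triplets.map (fun t => etsA_join example_text t.1)
  let opinions := triplets.map (fun t => etsA_join example_text t.2.1)
  let polarities := triplets.map (fun t => t.2.2)
  (PySem.Str.join " " example_text, aspects.zip (opinions.zip polarities))

-- ===== PORT B =====
-- render: out=""; first=True; for i in indices: out = text[i] if first else out+" "+text[i]; first=False
def etsB_render (text : List String) (idxs : List Int) : String :=
  (idxs.foldl
    (fun (st : String × Bool) i =>
      let word := PySem.List.pyGetD text i ""
      (if st.2 then word else st.1 ++ " " ++ word, false))
    ("", true)).1

def example_to_string_alt (example_text : List String) (triplets : List (List Int × List Int × String)) : String × (List (String × String × String)) :=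
  let sentence := etsB_render example_text (PySem.List.pyRange 0 (example_text.length : Int) 1)
  (sentence, triplets.map (fun t => (etsB_render example_text t.1, etsB_render example_text t.2.1, t.2.2)))

-- ===== PRECONDITION & SPEC =====
-- Pre_: every token index of every triplet is a valid Python index into example_text (A raises IndexError otherwise)
def Pre_example_to_string (example_text : List String) (triplets : List (List Int × List Int × String)) : Prop :=
  ∀ t ∈ triplets, (∀ i ∈ t.1, PySem.Raise.InRange example_text.length i) ∧
    (∀ i ∈ t.2.1, PySem.Raise.InRange example_text.length i)
instance (example_text : List String) (triplets : List (List Int × List Int × String)) : Decidable (Pre_example_to_string example_text triplets) := by unfold Pre_example_to_string; infer_instance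

def pvWitness_example_to_string : List String × (List (List Int × List Int × String)) :=
  (["great", "food", "bad", "service"], [([1], [0], "POS"), ([3], [2, -1], "NEG")])

def Spec_example_to_string (example_text : List String) (triplets : List (List Int × List Int × String)) (out : String × (List (String × String × String))) : Prop := out = example_to_string_alt example_text triplets
instance (example_text : List String) (triplets : List (List Int × List Int × String)) (out : String × (List (String × String × String))) : Decidable (Spec_example_to_string example_text triplets out) := by unfold Spec_example_to_string; infer_instance

-- ===== CLAIM =====
def Claim_equal_example_to_string : Prop := ∀ (example_text : List String) (triplets : List (List Int × List Int × String)), Dom_example_to_string example_text triplets → Pre_example_to_string example_text triplets → Spec_example_to_string example_text triplets (example_to_string example_text triplets)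

-- ===== LEMMAS AND PROOFS =====
theorem ets_join_nil (s : String) : PySem.Str.join s [] = "" := by
  simp [PySem.Str.join, PySem.Chars.join, List.intercalate]

theorem ets_join_singleton (s a : String) : PySem.Str.join s [a] = a := by
  simp [PySem.Str.join, PySem.Chars.join, List.intercalate, String.ofList]

theorem ets_join_cons_cons (s a b : String) (l : List String) :
    PySem.Str.join s (a :: b :: l) = a ++ s ++ PySem.Str.join s (b :: l) := by
  simp [PySem.Str.join, PySem.Chars.join_cons_cons, String.append_assoc]

-- pulling a leading "acc ++ sep" out of a join
theorem ets_join_pull (acc x : String) (l : List String) :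
    PySem.Str.join " " ((acc ++ " " ++ x) :: l) = acc ++ " " ++ PySem.Str.join " " (x :: l) := by
  cases l with
  | nil => simp [ets_join_singleton]
  | cons y ys => simp [ets_join_cons_cons, String.append_assoc]

-- the fold of render, once past the first word, is a join with the accumulator prepended
theorem ets_render_aux (text : List String) (idxs : List Int) (acc : String) :
    (idxs.foldl
      (fun (st : String × Bool) i =>
        let word := PySem.List.pyGetD text i ""
        (if st.2 then word else st.1 ++ " " ++ word, false))
      (acc, false)).1
    = PySem.Str.join " " (acc :: idxs.map (fun i => PySem.List.pyGetD text i "")) := by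
  induction idxs generalizing acc with
  | nil => simp [ets_join_singleton]
  | cons i rest ih =>
    have h1 : List.foldl
        (fun (st : String × Bool) i =>
          let word := PySem.List.pyGetD text i ""
          (if st.2 then word else st.1 ++ " " ++ word, false))
        (acc, false) (i :: rest)
        = List.foldl
        (fun (st : String × Bool) i =>
          let word := PySem.List.pyGetD text i ""
          (if st.2 then word else st.1 ++ " " ++ word, false))
        (acc ++ " " ++ PySem.List.pyGetD text i "", false) rest := rfl
    rw [h1, ih, List.map_cons, ets_join_pull, ets_join_cons_cons]

-- render computes exactly " ".join of the selected words
theorem ets_render_eq_join (text : List String) (idxs : List Int) :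
    etsB_render text idxs = etsA_join text idxs := by
  cases idxs with
  | nil => simp [etsB_render, etsA_join, ets_join_nil]
  | cons i rest => simp [etsB_render, etsA_join, List.foldl, ets_render_aux]

-- render over range(len(text)) is " ".join(text)
theorem ets_render_range (text : List String) :
    etsB_render text (PySem.List.pyRange 0 (text.length : Int) 1) = PySem.Str.join " " text := by
  rw [ets_render_eq_join]
  unfold etsA_join
  rw [PySem.List.map_pyGetD_pyRange_zero']

-- zip of three maps over the same list is the map of the tuple
theorem ets_zip3_map {α β γ δ : Type} (f : α → β) (g : α → γ) (h : α → δ) (l : List α) :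
    (l.map f).zip ((l.map g).zip (l.map h)) = l.map (fun t => (f t, g t, h t)) := by
  induction l with
  | nil => rfl
  | cons x xs ih => simp [List.map, List.zip]

-- ===== VERDICT =====
theorem example_to_string_spec : Claim_equal_example_to_string := by
  intro example_text triplets _ _
  unfold Spec_example_to_string example_to_string example_to_string_alt
  rw [ets_render_range]
  simp only [ets_zip3_map, ets_render_eq_join]
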